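-- pv_equiv track=rewrite | github.com/dguo456/jiuzhang | DP/114-Unique Paths.py | uniqueWeightedPaths
-- ===== SOURCE A (Python) =====
-- def uniqueWeightedPaths(grid):
--     if not grid or not grid[0]:
--         return 0
--
--     dp = [set() for i in range(len(grid[0]))]
--     dp[len(grid[0]) - 1].add(0)
--
--     for row in range(len(grid) - 1, -1, -1):
--         for col in range(len(grid[0]) - 1, -1, -1):
--             if col + 1 < len(grid[0]):
--                 dp[col] = dp[col].union(dp[col + 1])
--             dp[col] = set([(obj + grid[row][col]) for obj in dp[col]])
--
--     return sum(dp[0])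
-- ===== SOURCE B (Python) =====
-- def uniqueWeightedPaths(grid):
--     if not grid or not grid[0]:
--         return 0
--     C = len(grid[0])
--
--     def build(pairs):
--         # pairs[c] = (cell value, set of distinct path sums from the cell below)
--         (g, s) = pairs[0]
--         if len(pairs) == 1:
--             return [{v + g for v in s}]
--         rest = build(pairs[1:])
--         return [{v + g for v in (s | rest[0])}] + rest
--
--     def solve(rows):
--         # list of the sets of distinct path sums starting at each cell of rows[0]
--         if not rows:
--             return [set()] * (C - 1) + [{0}]
--         return build(list(zip(rows[0], solve(rows[1:]))))
--
--     return sum(solve(grid)[0])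
-- ===== Notes on version B (the rewrite author's own statement) =====
-- stated objective: alternative
-- what changed: Replaces the iterative in-place rolling 1-D dp array with index arithmetic by a pure structural recursion over the list of rows (and, within a row, over the zipped (cell, below-set) pairs), building a fresh list of sets per row.
import Mathlib
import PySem

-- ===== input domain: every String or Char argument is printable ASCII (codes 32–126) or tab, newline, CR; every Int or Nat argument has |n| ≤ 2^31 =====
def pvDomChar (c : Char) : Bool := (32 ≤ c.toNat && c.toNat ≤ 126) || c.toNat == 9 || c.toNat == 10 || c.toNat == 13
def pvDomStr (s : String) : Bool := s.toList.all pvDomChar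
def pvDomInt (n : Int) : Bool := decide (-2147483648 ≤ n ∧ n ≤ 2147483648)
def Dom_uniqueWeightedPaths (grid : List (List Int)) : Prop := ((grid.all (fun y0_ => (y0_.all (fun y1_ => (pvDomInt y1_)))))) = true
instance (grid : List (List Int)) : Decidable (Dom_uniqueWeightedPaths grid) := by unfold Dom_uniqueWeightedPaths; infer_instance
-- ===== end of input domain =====

-- B replaces A's in-place rolling 1-D dp array by a pure structural recursion over the rows
-- (and over zipped (cell, below-set) pairs within a row); same cost, different decomposition.

-- ===== PORT A =====
-- one step of A's inner 'for col' loop body (named so the proofs can speak about it)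
def pvStepA (grid : List (List Int)) (C : Nat) (row : Int)
    (dp : List (PySem.Set Int)) (col : Int) : List (PySem.Set Int) :=
  let dp := if col + 1 < (C : Int) then
      PySem.List.pySetD dp col
        (PySem.Set.union (PySem.List.pyGetD dp col PySem.Set.empty)
          (PySem.List.pyGetD dp (col + 1) PySem.Set.empty))
    else dp
  PySem.List.pySetD dp col
    (PySem.Set.ofList ((PySem.List.pyGetD dp col PySem.Set.empty).map
      (fun obj => obj + PySem.List.pyGetD (PySem.List.pyGetD grid row []) col 0)))

def uniqueWeightedPaths (grid : List (List Int)) : Int :=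
  if grid = [] ∨ grid.headD [] = [] then 0
  else
    let C : Nat := (grid.headD []).length
    let dp0 : List (PySem.Set Int) :=
      ((List.range C).map (fun _ => (PySem.Set.empty : PySem.Set Int))).set (C - 1)
        (PySem.Set.add PySem.Set.empty 0)
    let dp := (PySem.List.pyRange ((grid.length : Int) - 1) (-1) (-1)).foldl
      (fun dp row =>
        (PySem.List.pyRange ((C : Int) - 1) (-1) (-1)).foldl (pvStepA grid C row) dp) dp0
    (PySem.List.pyGetD dp 0 PySem.Set.empty).sum

-- ===== PORT B =====
-- build(pairs): pairs[c] = (cell value, set of path sums from the cell below)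
def pvBuild : List (Int × PySem.Set Int) → List (PySem.Set Int)
  | [] => []   -- unreachable in Python B under Pre_ (pairs[0] would raise); harmless total default
  | [(g, s)] => [PySem.Set.ofList (s.map (fun v => v + g))]
  | (g, s) :: p :: rest =>
      let r := pvBuild (p :: rest)
      PySem.Set.ofList ((PySem.Set.union s (r.headD PySem.Set.empty)).map (fun v => v + g)) :: r

-- solve(rows): sets of distinct path sums starting at each cell of rows[0]
def pvSolve (C : Nat) : List (List Int) → List (PySem.Set Int)
  | [] => List.replicate (C - 1) PySem.Set.empty ++ [PySem.Set.add PySem.Set.empty 0]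
  | row :: rows => pvBuild (row.zip (pvSolve C rows))

def uniqueWeightedPaths_alt (grid : List (List Int)) : Int :=
  if grid = [] ∨ grid.headD [] = [] then 0
  else ((pvSolve (grid.headD []).length grid).headD PySem.Set.empty).sum

-- ===== PRECONDITION & SPEC =====
-- Pre_ excludes exactly the grids on which A raises IndexError: a row shorter than the first row.
def Pre_uniqueWeightedPaths (grid : List (List Int)) : Prop :=
  ∀ row ∈ grid, (grid.headD []).length ≤ row.length
instance (grid : List (List Int)) : Decidable (Pre_uniqueWeightedPaths grid) := by
  unfold Pre_uniqueWeightedPaths; infer_instance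
def pvWitness_uniqueWeightedPaths : List (List Int) := [[1, 2], [3, 4]]

def Spec_uniqueWeightedPaths (grid : List (List Int)) (out : Int) : Prop := out = uniqueWeightedPaths_alt grid
instance (grid : List (List Int)) (out : Int) : Decidable (Spec_uniqueWeightedPaths grid out) := by unfold Spec_uniqueWeightedPaths; infer_instance

-- ===== CLAIM (what is proved, stated in full; the proofs are below) =====
def Claim_equal_uniqueWeightedPaths : Prop := ∀ (grid : List (List Int)), Dom_uniqueWeightedPaths grid → Pre_uniqueWeightedPaths grid → Spec_uniqueWeightedPaths grid (uniqueWeightedPaths grid)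

-- ===== LEMMAS AND PROOFS =====

theorem pvBuild_length : ∀ (ps : List (Int × PySem.Set Int)), (pvBuild ps).length = ps.length
  | [] => rfl
  | [(_, _)] => rfl
  | (g, s) :: p :: rest => by
      simp only [pvBuild, List.length_cons, pvBuild_length (p :: rest)]

theorem pvSolve_length (C : Nat) (hC : 1 ≤ C) :
    ∀ (rows : List (List Int)), (∀ row ∈ rows, C ≤ row.length) → (pvSolve C rows).length = C
  | [], _ => by simp [pvSolve]; omega
  | row :: rows, h => by
      have ih := pvSolve_length C hC rows (fun r hr => h r (List.mem_cons_of_mem _ hr))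
      have hr := h row (List.mem_cons_self)
      simp [pvSolve, pvBuild_length, ih]
      omega

theorem pvBuild_getElem_last (ps : List (Int × PySem.Set Int)) (k : Nat)
    (hk : k + 1 = ps.length) (h : k < (pvBuild ps).length) (h' : k < ps.length) :
    (pvBuild ps)[k] = PySem.Set.ofList ((ps[k].2).map (fun v => v + ps[k].1)) := by
  induction ps generalizing k with
  | nil => simp at h'
  | cons hd tl ih =>
    obtain ⟨g, s⟩ := hd
    cases tl with
    | nil =>
      have hk0 : k = 0 := by simp at hk; omega
      subst hk0; rfl
    | cons p rest =>
      obtain ⟨m, rfl⟩ : ∃ m, k = m + 1 := by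
        refine ⟨k - 1, ?_⟩
        simp at hk; omega
      have hb : pvBuild ((g, s) :: p :: rest)
          = PySem.Set.ofList ((PySem.Set.union s ((pvBuild (p :: rest)).headD PySem.Set.empty)).map
              (fun v => v + g)) :: pvBuild (p :: rest) := rfl
      have hm' : m < (p :: rest).length := by simp at h' ⊢; omega
      have hmb : m < (pvBuild (p :: rest)).length := by rw [pvBuild_length]; exact hm'
      have hmk : m + 1 = (p :: rest).length := by simp at hk ⊢; omega
      calc (pvBuild ((g, s) :: p :: rest))[m + 1]
          = (pvBuild (p :: rest))[m] := by simp [hb]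
        _ = _ := by rw [ih m hmk hmb hm']; simp

theorem pvBuild_getElem (ps : List (Int × PySem.Set Int)) (k : Nat)
    (hk : k + 1 < ps.length) (h : k < (pvBuild ps).length) (h' : k < ps.length)
    (h2 : k + 1 < (pvBuild ps).length) :
    (pvBuild ps)[k] = PySem.Set.ofList
      ((PySem.Set.union (ps[k].2) ((pvBuild ps)[k+1])).map (fun v => v + ps[k].1)) := by
  induction ps generalizing k with
  | nil => simp at h'
  | cons hd tl ih =>
    obtain ⟨g, s⟩ := hd
    cases tl with
    | nil => simp at hk
    | cons p rest =>
      have hb : pvBuild ((g, s) :: p :: rest)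
          = PySem.Set.ofList ((PySem.Set.union s ((pvBuild (p :: rest)).headD PySem.Set.empty)).map
              (fun v => v + g)) :: pvBuild (p :: rest) := rfl
      have hne : pvBuild (p :: rest) ≠ [] := by
        intro hx
        have := pvBuild_length (p :: rest)
        rw [hx] at this; simp at this
      cases k with
      | zero =>
        obtain ⟨x, xs, hx⟩ := List.exists_cons_of_ne_nil hne
        simp [hb, hx]
      | succ m =>
        have hm' : m < (p :: rest).length := by simp at h' ⊢; omega
        have hmb : m < (pvBuild (p :: rest)).length := by rw [pvBuild_length]; exact hm'
        have hmk : m + 1 < (p :: rest).length := by simp at hk ⊢; omega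
        have hmb2 : m + 1 < (pvBuild (p :: rest)).length := by rw [pvBuild_length]; exact hmk
        calc (pvBuild ((g, s) :: p :: rest))[m + 1]
            = (pvBuild (p :: rest))[m] := by simp [hb]
          _ = _ := by rw [ih m hmk hmb hm' hmb2]; simp [hb]

theorem pvStepA_eq (grid : List (List Int)) (rowIdx : Int) (rowA : List Int)
    (hrow : PySem.List.pyGetD grid rowIdx [] = rowA)
    (C : Nat) (dp : List (PySem.Set Int)) (hdp : dp.length = C) (hlen : C ≤ rowA.length)
    (c : Nat) (hc : c < C) :
    pvStepA grid C rowIdx (dp.take (c+1) ++ (pvBuild (rowA.zip dp)).drop (c+1)) (c : Int)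
      = dp.take c ++ (pvBuild (rowA.zip dp)).drop c := by
  have hzl : (rowA.zip dp).length = C := by simp [hdp]; omega
  have hF : (pvBuild (rowA.zip dp)).length = C := by rw [pvBuild_length]; exact hzl
  have htl : (dp.take (c+1)).length = c + 1 := by simp [hdp]; omega
  have hSl : (dp.take (c+1) ++ (pvBuild (rowA.zip dp)).drop (c+1)).length = C := by
    simp [hdp, hF]; omega
  have hcS : c < (dp.take (c+1) ++ (pvBuild (rowA.zip dp)).drop (c+1)).length := by omega
  have hcF : c < (pvBuild (rowA.zip dp)).length := by omega
  have hcz : c < (rowA.zip dp).length := by omega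
  have hcr : c < rowA.length := by omega
  have hcd : c < dp.length := by omega
  have hSc : (dp.take (c+1) ++ (pvBuild (rowA.zip dp)).drop (c+1))[c]'hcS = dp[c] := by
    rw [List.getElem_append_left (by rw [htl]; omega)]
    exact List.getElem_take
  have hg : (PySem.List.pyGetD grid rowIdx []).getD c 0 = rowA[c] := by
    rw [hrow, List.getD_eq_getElem rowA 0 hcr]
  have hzc : (rowA.zip dp)[c]'hcz = (rowA[c], dp[c]) := by simp [List.getElem_zip]
  have hset : ∀ w, (dp.take (c+1) ++ (pvBuild (rowA.zip dp)).drop (c+1)).set c w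
      = dp.take c ++ (w :: (pvBuild (rowA.zip dp)).drop (c+1)) := by
    intro w
    rw [List.take_succ_eq_append_getElem hcd, List.append_assoc,
        List.set_append_right c w (by simp; try omega)]
    have h0 : c - (dp.take c).length = 0 := by simp; try omega
    rw [h0]
    rfl
  have hgetset : ∀ v, ((dp.take (c+1) ++ (pvBuild (rowA.zip dp)).drop (c+1)).set c v).getD c
      PySem.Set.empty = v := by
    intro v
    rw [List.getD_eq_getElem _ PySem.Set.empty (by simpa using hcS)]
    exact List.getElem_set_self (by simpa using hcS)
  have hdropc : (pvBuild (rowA.zip dp)).drop c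
      = (pvBuild (rowA.zip dp))[c] :: (pvBuild (rowA.zip dp)).drop (c+1) :=
    List.drop_eq_getElem_cons hcF
  by_cases hcase : c + 1 < C
  · -- interior column
    have hc1S : c + 1 < (dp.take (c+1) ++ (pvBuild (rowA.zip dp)).drop (c+1)).length := by omega
    have hc1F : c + 1 < (pvBuild (rowA.zip dp)).length := by omega
    have hSc1 : (dp.take (c+1) ++ (pvBuild (rowA.zip dp)).drop (c+1))[c+1]'hc1S
        = (pvBuild (rowA.zip dp))[c+1] := by
      rw [List.getElem_append_right (by rw [htl])]
      simp [htl, List.getElem_drop]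
    have hFc : (pvBuild (rowA.zip dp))[c] = PySem.Set.ofList
        ((PySem.Set.union dp[c] ((pvBuild (rowA.zip dp))[c+1])).map (fun v => v + rowA[c])) := by
      rw [pvBuild_getElem (rowA.zip dp) c (by omega) (by omega) (by omega) (by omega), hzc]
    simp only [pvStepA]
    rw [if_pos (show (c : Int) + 1 < (C : Int) by exact_mod_cast hcase)]
    rw [show ((c : Int) + 1) = ((c + 1 : Nat) : Int) by omega]
    simp only [PySem.List.pySetD_natCast, PySem.List.pyGetD_natCast]
    rw [List.getD_eq_getElem _ PySem.Set.empty hcS, List.getD_eq_getElem _ PySem.Set.empty hc1S,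
        hSc, hSc1, hgetset, List.set_set, hg, hset, hdropc, ← hFc]
  · -- last column
    have hFc : (pvBuild (rowA.zip dp))[c] = PySem.Set.ofList
        ((dp[c]).map (fun v => v + rowA[c])) := by
      rw [pvBuild_getElem_last (rowA.zip dp) c (by omega) (by omega) (by omega), hzc]
    simp only [pvStepA]
    rw [if_neg (show ¬ ((c : Int) + 1 < (C : Int)) by omega)]
    simp only [PySem.List.pySetD_natCast, PySem.List.pyGetD_natCast]
    rw [List.getD_eq_getElem _ PySem.Set.empty hcS, hSc, hg, hset, hdropc, ← hFc]

theorem pvRange_split (A B : Int) (hAB : B < A) :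
    PySem.List.pyRange (A - 1) (B - 1) (-1) = PySem.List.pyRange (A - 1) B (-1) ++ [B] := by
  rw [PySem.List.pyRange_neg_one_eq_reverse, PySem.List.pyRange_neg_one_eq_reverse]
  have h1 : B - 1 + 1 = B := by ring
  have h2 : A - 1 + 1 = A := by ring
  rw [h1, h2]
  rw [PySem.List.pyRange_one_cons hAB]
  simp

theorem pvInner_inv (grid : List (List Int)) (rowIdx : Int) (rowA : List Int)
    (hrow : PySem.List.pyGetD grid rowIdx [] = rowA)
    (C : Nat) (dp : List (PySem.Set Int)) (hdp : dp.length = C) (hlen : C ≤ rowA.length) :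
    ∀ (n : Nat), n ≤ C →
    (PySem.List.pyRange ((C : Int) - 1) (((C - n : Nat) : Int) - 1) (-1)).foldl
        (pvStepA grid C rowIdx) dp
      = dp.take (C - n) ++ (pvBuild (rowA.zip dp)).drop (C - n)
  | 0, _ => by
      have hzl : (rowA.zip dp).length = C := by simp [hdp]; omega
      have hF : (pvBuild (rowA.zip dp)).length = C := by rw [pvBuild_length]; exact hzl
      have he : PySem.List.pyRange ((C : Int) - 1) (((C - 0 : Nat) : Int) - 1) (-1) = [] := by
        apply PySem.List.pyRange_neg_one_eq_nil
        simp
      rw [he]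
      simp only [List.foldl_nil, Nat.sub_zero]
      rw [List.take_of_length_le (le_of_eq hdp), List.drop_of_length_le (le_of_eq hF),
        List.append_nil]
  | n + 1, hn => by
      have ih := pvInner_inv grid rowIdx rowA hrow C dp hdp hlen n (by omega)
      have hc : C - (n + 1) < C := by omega
      have hcc : C - n = (C - (n + 1)) + 1 := by omega
      have hsplit : PySem.List.pyRange ((C : Int) - 1) (((C - (n + 1) : Nat) : Int) - 1) (-1)
          = PySem.List.pyRange ((C : Int) - 1) (((C - (n + 1) : Nat) : Int)) (-1)
            ++ [((C - (n + 1) : Nat) : Int)] := by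
        apply pvRange_split
        exact_mod_cast hc
      have he2 : PySem.List.pyRange ((C : Int) - 1) (((C - (n + 1) : Nat) : Int)) (-1)
          = PySem.List.pyRange ((C : Int) - 1) (((C - n : Nat) : Int) - 1) (-1) := by
        congr 1
        push_cast [hcc]
        ring
      rw [hsplit, List.foldl_append, he2, ih, hcc]
      simpa using pvStepA_eq grid rowIdx rowA hrow C dp hdp hlen (C - (n + 1)) hc

theorem pvInner_eq_build (grid : List (List Int)) (rowIdx : Int) (rowA : List Int)
    (hrow : PySem.List.pyGetD grid rowIdx [] = rowA)
    (C : Nat) (dp : List (PySem.Set Int)) (hdp : dp.length = C) (hlen : C ≤ rowA.length) :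
    (PySem.List.pyRange ((C : Int) - 1) (-1) (-1)).foldl (pvStepA grid C rowIdx) dp
      = pvBuild (rowA.zip dp) := by
  have := pvInner_inv grid rowIdx rowA hrow C dp hdp hlen C (le_refl C)
  simpa using this

theorem pvDp0_eq (C : Nat) (hC : 1 ≤ C) :
    ((List.range C).map (fun _ => (PySem.Set.empty : PySem.Set Int))).set (C - 1)
        (PySem.Set.add PySem.Set.empty 0)
      = List.replicate (C - 1) PySem.Set.empty ++ [PySem.Set.add PySem.Set.empty 0] := by
  have h1 : (List.range C).map (fun _ => (PySem.Set.empty : PySem.Set Int))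
      = List.replicate C PySem.Set.empty := by simp
  have h2 : List.replicate C (PySem.Set.empty : PySem.Set Int)
      = List.replicate (C - 1) PySem.Set.empty ++ [PySem.Set.empty] := by
    conv_lhs => rw [show C = (C - 1) + 1 by omega]
    rw [List.replicate_succ']
  rw [h1, h2]
  have h3 : (List.replicate (C - 1) (PySem.Set.empty : PySem.Set Int)).length = C - 1 := by simp
  rw [List.set_append_right (C - 1) _ (le_of_eq h3)]
  simp

theorem pvOuter_inv (grid : List (List Int)) (C : Nat) (hC : 1 ≤ C)
    (hpre : ∀ row ∈ grid, C ≤ row.length) :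
    ∀ (n : Nat), n ≤ grid.length →
    (PySem.List.pyRange ((grid.length : Int) - 1) (((grid.length - n : Nat) : Int) - 1) (-1)).foldl
        (fun dp row =>
          (PySem.List.pyRange ((C : Int) - 1) (-1) (-1)).foldl (pvStepA grid C row) dp)
        (((List.range C).map (fun _ => (PySem.Set.empty : PySem.Set Int))).set (C - 1)
          (PySem.Set.add PySem.Set.empty 0))
      = pvSolve C (grid.drop (grid.length - n))
  | 0, _ => by
      have he : PySem.List.pyRange ((grid.length : Int) - 1)
          (((grid.length - 0 : Nat) : Int) - 1) (-1) = [] := by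
        apply PySem.List.pyRange_neg_one_eq_nil
        simp
      rw [he]
      simp only [List.foldl_nil, Nat.sub_zero, List.drop_length, pvSolve]
      exact pvDp0_eq C hC
  | n + 1, hn => by
      have ih := pvOuter_inv grid C hC hpre n (by omega)
      set L := grid.length with hL
      have hk : L - (n + 1) < L := by omega
      have hcc : L - n = (L - (n + 1)) + 1 := by omega
      set k := L - (n + 1) with hkdef
      have hsplit : PySem.List.pyRange ((L : Int) - 1) ((k : Int) - 1) (-1)
          = PySem.List.pyRange ((L : Int) - 1) ((k : Int)) (-1) ++ [(k : Int)] := by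
        apply pvRange_split
        exact_mod_cast hk
      have he2 : PySem.List.pyRange ((L : Int) - 1) ((k : Int)) (-1)
          = PySem.List.pyRange ((L : Int) - 1) (((L - n : Nat) : Int) - 1) (-1) := by
        congr 1
        push_cast [hcc]
        ring
      rw [hsplit, List.foldl_append, he2, ih]
      have hkg : k < grid.length := hk
      have hrow : PySem.List.pyGetD grid (k : Int) [] = grid[k] := by
        rw [PySem.List.pyGetD_natCast, List.getD_eq_getElem grid [] hkg]
      have hdrop1 : ∀ r ∈ grid.drop ((L - (n + 1)) + 1), C ≤ r.length :=
        fun r hr => hpre r (List.mem_of_mem_drop hr)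
      have hdp : (pvSolve C (grid.drop ((L - (n + 1)) + 1))).length = C := by
        apply pvSolve_length C hC _ hdrop1
      simp only [List.foldl_cons, List.foldl_nil]
      rw [hcc] at *
      rw [pvInner_eq_build grid (k : Int) grid[k] hrow C _ hdp (hpre grid[k] (by simp))]
      have : grid.drop k = grid[k] :: grid.drop (k + 1) := List.drop_eq_getElem_cons hkg
      rw [this]
      rfl

theorem pvHeadD_eq (l : List (PySem.Set Int)) (hne : l ≠ []) :
    PySem.List.pyGetD l 0 PySem.Set.empty = l.headD PySem.Set.empty := by
  cases l with
  | nil => exact absurd rfl hne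
  | cons x xs => simp [PySem.List.pyGetD_zero]

-- ===== VERDICT (by name: the statement is the Claim_ definition above) =====
theorem uniqueWeightedPaths_spec : Claim_equal_uniqueWeightedPaths := by
  intro grid _ hpre
  unfold Spec_uniqueWeightedPaths uniqueWeightedPaths uniqueWeightedPaths_alt
  by_cases hguard : grid = [] ∨ grid.headD [] = []
  · rw [if_pos hguard, if_pos hguard]
  · rw [if_neg hguard, if_neg hguard]
    rw [not_or] at hguard
    obtain ⟨hg, hh⟩ := hguard
    set C := (grid.headD []).length with hCdef
    have hC : 1 ≤ C := by
      rw [hCdef]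
      cases h : grid.headD [] with
      | nil => exact absurd h hh
      | cons x xs => simp
    have hL : 1 ≤ grid.length := by
      cases grid with
      | nil => exact absurd rfl hg
      | cons r rs => simp
    have hpre' : ∀ row ∈ grid, C ≤ row.length := hpre
    have h0 := pvOuter_inv grid C hC hpre' grid.length (le_refl _)
    simp only [Nat.sub_self, Nat.cast_zero, zero_sub, List.drop_zero] at h0
    show (PySem.List.pyGetD
        ((PySem.List.pyRange ((grid.length : Int) - 1) (-1) (-1)).foldl
          (fun dp row =>
            (PySem.List.pyRange ((C : Int) - 1) (-1) (-1)).foldl (pvStepA grid C row) dp)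
          (((List.range C).map (fun _ => (PySem.Set.empty : PySem.Set Int))).set (C - 1)
            (PySem.Set.add PySem.Set.empty 0))) 0 PySem.Set.empty).sum
      = ((pvSolve C grid).headD PySem.Set.empty).sum
    rw [h0]
    congr 1
    apply pvHeadD_eq
    intro hx
    have := pvSolve_length C hC grid hpre'
    rw [hx] at this
    simp at this
    omega
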